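-- pv_equiv track=rewrite | github.com/utsab357/HireVex | backend/analysis/title_data.py | detect_seniority
-- ===== SOURCE A (Python) =====
-- SENIORITY_KEYWORDS = {
--     # (keyword, level)  —  higher number = more senior
--     'intern': 0,
--     'trainee': 0,
--     'apprentice': 0,
--     'fresher': 0,
--     'junior': 1,
--     'jr': 1,
--     'associate': 1,
--     'entry level': 1,
--     'entry-level': 1,
--     'mid': 2,
--     'mid-level': 2,
--     'mid level': 2,
--     'senior': 3,
--     'sr': 3,
--     'lead': 4,
--     'tech lead': 4,
--     'team lead': 4,
--     'principal': 5,
--     'staff': 5,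
--     'distinguished': 5,
--     'architect': 4,
--     'manager': 4,
--     'engineering manager': 4,
--     'director': 5,
--     'head of': 5,
--     'head': 5,
--     'vp': 6,
--     'vice president': 6,
--     'cto': 7,
--     'ceo': 7,
--     'co-founder': 6,
--     'founder': 7,
-- }
--
-- def detect_seniority(title_text):
--     """
--     Detect seniority level from a job title.
--     Returns: int (0-7) where 0=intern, 7=C-level.
--     Default: 2 (mid-level) if no seniority keyword found.
--     """
--     if not title_text:
--         return 2  # Default to mid
--
--     title_lower = title_text.lower().strip()
--
--     # Check for seniority keywords (longest match first)
--     detected_level = None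
--     for keyword, level in sorted(SENIORITY_KEYWORDS.items(), key=lambda x: len(x[0]), reverse=True):
--         if keyword in title_lower:
--             detected_level = level
--             break
--
--     return detected_level if detected_level is not None else 2  # Default mid
-- ===== SOURCE B (Python) =====
-- SENIORITY_KEYWORDS = {
--     'intern': 0, 'trainee': 0, 'apprentice': 0, 'fresher': 0,
--     'junior': 1, 'jr': 1, 'associate': 1, 'entry level': 1, 'entry-level': 1,
--     'mid': 2, 'mid-level': 2, 'mid level': 2,
--     'senior': 3, 'sr': 3,
--     'lead': 4, 'tech lead': 4, 'team lead': 4,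
--     'principal': 5, 'staff': 5, 'distinguished': 5,
--     'architect': 4, 'manager': 4, 'engineering manager': 4,
--     'director': 5, 'head of': 5, 'head': 5,
--     'vp': 6, 'vice president': 6,
--     'cto': 7, 'ceo': 7,
--     'co-founder': 6, 'founder': 7,
-- }
--
-- def detect_seniority(title_text):
--     """Single max-tracking pass over the keyword dict: no sorting.
--
--     Keeps the longest matching keyword (strictly-greater update, so
--     equal-length ties resolve to the earliest inserted keyword, exactly
--     like a stable sort by length followed by first-match).
--     """
--     if not title_text:
--         return 2
--
--     title_lower = title_text.lower().strip()
--
--     best_len = -1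
--     detected_level = None
--     for keyword, level in SENIORITY_KEYWORDS.items():
--         if keyword in title_lower and len(keyword) > best_len:
--             best_len = len(keyword)
--             detected_level = level
--
--     return detected_level if detected_level is not None else 2
-- ===== Notes on version B (the rewrite author's own statement) =====
-- stated objective: alternative
-- what changed: B replaces A's sort-by-length-then-first-match-with-break by a single max-tracking pass over the keyword dict in insertion order, keeping the strictly-longest matching keyword.
import Mathlib
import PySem

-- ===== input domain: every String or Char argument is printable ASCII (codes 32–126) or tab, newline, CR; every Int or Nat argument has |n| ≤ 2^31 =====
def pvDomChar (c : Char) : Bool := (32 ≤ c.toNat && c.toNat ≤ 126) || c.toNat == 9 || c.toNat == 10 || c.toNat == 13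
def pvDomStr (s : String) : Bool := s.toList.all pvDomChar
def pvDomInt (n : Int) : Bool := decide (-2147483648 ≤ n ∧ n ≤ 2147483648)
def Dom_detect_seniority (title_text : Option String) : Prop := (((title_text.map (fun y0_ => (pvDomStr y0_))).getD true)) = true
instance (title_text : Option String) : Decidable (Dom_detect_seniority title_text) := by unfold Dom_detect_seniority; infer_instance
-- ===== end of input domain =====

-- B replaces A's sort-by-length-then-first-match by a single strictly-longest-match tracking pass over the keyword dict in insertion order (alternative decomposition, same results).

-- ===== PORT A =====
-- SENIORITY_KEYWORDS.items() in insertion order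
def pvKW : List (String × Int) := [("intern",0),("trainee",0),("apprentice",0),("fresher",0),("junior",1),("jr",1),("associate",1),("entry level",1),("entry-level",1),("mid",2),("mid-level",2),("mid level",2),("senior",3),("sr",3),("lead",4),("tech lead",4),("team lead",4),("principal",5),("staff",5),("distinguished",5),("architect",4),("manager",4),("engineering manager",4),("director",5),("head of",5),("head",5),("vp",6),("vice president",6),("cto",7),("ceo",7),("co-founder",6),("founder",7)]

-- A's loop: first keyword of the (sorted) list contained in the title, with break
def pvScanA (tl : String) : List (String × Int) → Option Int
  | [] => none
  | (k, l) :: rest => if PySem.Str.isIn k tl then some l else pvScanA tl rest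

def detect_seniority (title_text : Option String) : Int :=
  match title_text with
  | none => 2
  | some s =>
    if s = "" then 2
    else
      (pvScanA (PySem.Str.strip (PySem.Str.lower s))
        (PySem.List.sorted pvKW (fun p => PySem.Str.len p.1) true)).getD 2

-- ===== PORT B =====
-- B's loop body: keep the strictly longest matching keyword (state = (best_len, detected_level))
def pvStepB (tl : String) (st : Int × Option Int) (p : String × Int) : Int × Option Int :=
  if PySem.Str.isIn p.1 tl ∧ (PySem.Str.len p.1 : Int) > st.1 then ((PySem.Str.len p.1 : Int), some p.2) else st

def detect_seniority_alt (title_text : Option String) : Int :=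
  match title_text with
  | none => 2
  | some s =>
    if s = "" then 2
    else
      ((pvKW.foldl (pvStepB (PySem.Str.strip (PySem.Str.lower s))) (-1, none)).2).getD 2

-- ===== PRECONDITION & SPEC =====
def Spec_detect_seniority (title_text : Option String) (out : Int) : Prop := out = detect_seniority_alt title_text
instance (title_text : Option String) (out : Int) : Decidable (Spec_detect_seniority title_text out) := by unfold Spec_detect_seniority; infer_instance

-- ===== CLAIM (what is proved, stated in full; the proofs are below) =====
def Claim_equal_detect_seniority : Prop := ∀ (title_text : Option String), Dom_detect_seniority title_text → Spec_detect_seniority title_text (detect_seniority title_text)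

-- ===== LEMMAS AND PROOFS =====

-- A's sorted keyword list, evaluated once (stable sort by length, descending)
theorem pvSortEq : PySem.List.sorted pvKW (fun p => PySem.Str.len p.1) true = [("engineering manager",4),("vice president",6),("distinguished",5),("entry level",1),("entry-level",1),("apprentice",0),("co-founder",6),("associate",1),("mid-level",2),("mid level",2),("tech lead",4),("team lead",4),("principal",5),("architect",4),("director",5),("trainee",0),("fresher",0),("manager",4),("head of",5),("founder",7),("intern",0),("junior",1),("senior",3),("staff",5),("lead",4),("head",5),("mid",2),("cto",7),("ceo",7),("jr",1),("sr",3),("vp",6)] := by decide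

-- B's fold never updates past elements that miss the title or are not strictly longer
theorem pvFoldFrozen (tl : String) (m : Int) (v : Option Int) :
    ∀ ps : List (String × Int),
      (∀ p ∈ ps, PySem.Str.isIn p.1 tl = false ∨ (PySem.Str.len p.1 : Int) ≤ m) →
      ps.foldl (pvStepB tl) (m, v) = (m, v) := by
  intro ps
  induction ps with
  | nil => intro _; rfl
  | cons p ps ih =>
    intro h
    have hstep : pvStepB tl (m, v) p = (m, v) := by
      simp only [pvStepB]
      rw [if_neg]
      rintro ⟨hc, hgt⟩
      rcases h p (List.mem_cons_self) with hf | hle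
      · rw [hf] at hc; simp at hc
      · omega
    rw [List.foldl_cons, hstep]
    exact ih (fun q hq => h q (List.mem_cons_of_mem _ hq))

-- the tracked best length stays below m while every matching keyword is shorter than m
theorem pvFoldLt (tl : String) (m : Int) :
    ∀ (ps : List (String × Int)) (st : Int × Option Int), st.1 < m →
      (∀ p ∈ ps, PySem.Str.isIn p.1 tl = false ∨ (PySem.Str.len p.1 : Int) < m) →
      (ps.foldl (pvStepB tl) st).1 < m := by
  intro ps
  induction ps with
  | nil => intro st hst _; exact hst
  | cons p ps ih =>
    intro st hst h
    rw [List.foldl_cons]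
    apply ih
    · simp only [pvStepB]
      split
      · rename_i hc
        rcases h p (List.mem_cons_self) with hf | hlt
        · rw [hf] at hc; simp at hc
        · exact hlt
      · exact hst
    · exact fun q hq => h q (List.mem_cons_of_mem _ hq)

-- with no matching keyword at all the state never moves
theorem pvFoldFalse (tl : String) :
    ∀ (ps : List (String × Int)) (st : Int × Option Int),
      (∀ p ∈ ps, PySem.Str.isIn p.1 tl = false) →
      ps.foldl (pvStepB tl) st = st := by
  intro ps
  induction ps with
  | nil => intro st _; rfl
  | cons p ps ih =>
    intro st h
    have hstep : pvStepB tl st p = st := by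
      simp only [pvStepB]
      rw [if_neg]
      rintro ⟨hc, -⟩
      rw [h p (List.mem_cons_self)] at hc
      simp at hc
    rw [List.foldl_cons, hstep]
    exact ih st (fun q hq => h q (List.mem_cons_of_mem _ hq))

-- if kw matches and everything before it (in dict order) that matches is strictly shorter,
-- while everything after it is not strictly longer, B's fold returns kw's level
theorem pvCase (tl : String) (pre suf : List (String × Int)) (kw : String) (lvl : Int)
    (hin : PySem.Str.isIn kw tl = true)
    (hpre : ∀ p ∈ pre, PySem.Str.isIn p.1 tl = false ∨ (PySem.Str.len p.1 : Int) < (PySem.Str.len kw : Int))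
    (hsuf : ∀ p ∈ suf, PySem.Str.isIn p.1 tl = false ∨ (PySem.Str.len p.1 : Int) ≤ (PySem.Str.len kw : Int)) :
    ((((pre ++ (kw, lvl) :: suf).foldl (pvStepB tl) (-1, (none : Option Int))).2).getD 2) = lvl := by
  rw [List.foldl_append, List.foldl_cons]
  have h0 : ((-1 : Int), (none : Option Int)).1 < (PySem.Str.len kw : Int) := by
    have hnn : (0:Int) ≤ PySem.Str.len kw := by
      rw [PySem.Str.len_eq]; exact Int.natCast_nonneg _
    simpa using by omega
  have hlt := pvFoldLt tl (PySem.Str.len kw : Int) pre (-1, none) h0 hpre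
  have hstep : pvStepB tl (pre.foldl (pvStepB tl) (-1, none)) (kw, lvl)
      = ((PySem.Str.len kw : Int), some lvl) := by
    simp only [pvStepB]
    rw [if_pos ⟨hin, hlt⟩]
  rw [hstep, pvFoldFrozen tl _ _ suf hsuf]
  rfl

-- turn a decidable per-element disjunct over a known-false keyword set into the fold hypotheses
theorem pvDischarge (tl : String) (F : List String)
    (hF : ∀ k ∈ F, PySem.Str.isIn k tl = false)
    (ps : List (String × Int)) (Q : String × Int → Prop)
    (hd : ∀ p ∈ ps, p.1 ∈ F ∨ Q p) :
    ∀ p ∈ ps, PySem.Str.isIn p.1 tl = false ∨ Q p :=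
  fun p hp => (hd p hp).elim (fun h => Or.inl (hF p.1 h)) Or.inr

theorem pvConsF {tl k : String} {F : List String}
    (h : PySem.Str.isIn k tl = false)
    (hF : ∀ x ∈ F, PySem.Str.isIn x tl = false) :
    ∀ x ∈ k :: F, PySem.Str.isIn x tl = false := by
  intro x hx
  rcases List.mem_cons.mp hx with rfl | hx
  · exact h
  · exact hF x hx

-- the heart: first match over the sorted list = strictly-longest-match fold over the dict order
set_option maxHeartbeats 2000000 in
theorem pvKey (tl : String) :
    (pvScanA tl (PySem.List.sorted pvKW (fun p => PySem.Str.len p.1) true)).getD 2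
      = ((pvKW.foldl (pvStepB tl) (-1, none)).2).getD 2 := by
  rw [pvSortEq]
  have hF0 : ∀ x ∈ ([] : List String), PySem.Str.isIn x tl = false := by
    intro x hx; simp at hx
  by_cases h0 : PySem.Str.isIn "engineering manager" tl = true
  · rw [show pvKW = pvKW.take 22 ++ ("engineering manager", (4 : Int)) :: pvKW.drop 23 from by decide,
      pvCase tl _ _ _ _ h0 (pvDischarge tl _ hF0 _ _ (by decide)) (pvDischarge tl _ hF0 _ _ (by decide))]
    simp at h0
    simp [pvScanA, h0]
  have h0f : PySem.Str.isIn "engineering manager" tl = false := by simpa using h0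
  have h0c := h0f
  simp at h0c
  have hF1 := pvConsF h0f hF0
  by_cases h1 : PySem.Str.isIn "vice president" tl = true
  · rw [show pvKW = pvKW.take 27 ++ ("vice president", (6 : Int)) :: pvKW.drop 28 from by decide,
      pvCase tl _ _ _ _ h1 (pvDischarge tl _ hF1 _ _ (by decide)) (pvDischarge tl _ hF1 _ _ (by decide))]
    simp at h1
    simp [pvScanA, h0c, h1]
  have h1f : PySem.Str.isIn "vice president" tl = false := by simpa using h1
  have h1c := h1f
  simp at h1c
  have hF2 := pvConsF h1f hF1
  by_cases h2 : PySem.Str.isIn "distinguished" tl = true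
  · rw [show pvKW = pvKW.take 19 ++ ("distinguished", (5 : Int)) :: pvKW.drop 20 from by decide,
      pvCase tl _ _ _ _ h2 (pvDischarge tl _ hF2 _ _ (by decide)) (pvDischarge tl _ hF2 _ _ (by decide))]
    simp at h2
    simp [pvScanA, h0c, h1c, h2]
  have h2f : PySem.Str.isIn "distinguished" tl = false := by simpa using h2
  have h2c := h2f
  simp at h2c
  have hF3 := pvConsF h2f hF2
  by_cases h3 : PySem.Str.isIn "entry level" tl = true
  · rw [show pvKW = pvKW.take 7 ++ ("entry level", (1 : Int)) :: pvKW.drop 8 from by decide,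
      pvCase tl _ _ _ _ h3 (pvDischarge tl _ hF3 _ _ (by decide)) (pvDischarge tl _ hF3 _ _ (by decide))]
    simp at h3
    simp [pvScanA, h0c, h1c, h2c, h3]
  have h3f : PySem.Str.isIn "entry level" tl = false := by simpa using h3
  have h3c := h3f
  simp at h3c
  have hF4 := pvConsF h3f hF3
  by_cases h4 : PySem.Str.isIn "entry-level" tl = true
  · rw [show pvKW = pvKW.take 8 ++ ("entry-level", (1 : Int)) :: pvKW.drop 9 from by decide,
      pvCase tl _ _ _ _ h4 (pvDischarge tl _ hF4 _ _ (by decide)) (pvDischarge tl _ hF4 _ _ (by decide))]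
    simp at h4
    simp [pvScanA, h0c, h1c, h2c, h3c, h4]
  have h4f : PySem.Str.isIn "entry-level" tl = false := by simpa using h4
  have h4c := h4f
  simp at h4c
  have hF5 := pvConsF h4f hF4
  by_cases h5 : PySem.Str.isIn "apprentice" tl = true
  · rw [show pvKW = pvKW.take 2 ++ ("apprentice", (0 : Int)) :: pvKW.drop 3 from by decide,
      pvCase tl _ _ _ _ h5 (pvDischarge tl _ hF5 _ _ (by decide)) (pvDischarge tl _ hF5 _ _ (by decide))]
    simp at h5
    simp [pvScanA, h0c, h1c, h2c, h3c, h4c, h5]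
  have h5f : PySem.Str.isIn "apprentice" tl = false := by simpa using h5
  have h5c := h5f
  simp at h5c
  have hF6 := pvConsF h5f hF5
  by_cases h6 : PySem.Str.isIn "co-founder" tl = true
  · rw [show pvKW = pvKW.take 30 ++ ("co-founder", (6 : Int)) :: pvKW.drop 31 from by decide,
      pvCase tl _ _ _ _ h6 (pvDischarge tl _ hF6 _ _ (by decide)) (pvDischarge tl _ hF6 _ _ (by decide))]
    simp at h6
    simp [pvScanA, h0c, h1c, h2c, h3c, h4c, h5c, h6]
  have h6f : PySem.Str.isIn "co-founder" tl = false := by simpa using h6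
  have h6c := h6f
  simp at h6c
  have hF7 := pvConsF h6f hF6
  by_cases h7 : PySem.Str.isIn "associate" tl = true
  · rw [show pvKW = pvKW.take 6 ++ ("associate", (1 : Int)) :: pvKW.drop 7 from by decide,
      pvCase tl _ _ _ _ h7 (pvDischarge tl _ hF7 _ _ (by decide)) (pvDischarge tl _ hF7 _ _ (by decide))]
    simp at h7
    simp [pvScanA, h0c, h1c, h2c, h3c, h4c, h5c, h6c, h7]
  have h7f : PySem.Str.isIn "associate" tl = false := by simpa using h7
  have h7c := h7f
  simp at h7c
  have hF8 := pvConsF h7f hF7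
  by_cases h8 : PySem.Str.isIn "mid-level" tl = true
  · rw [show pvKW = pvKW.take 10 ++ ("mid-level", (2 : Int)) :: pvKW.drop 11 from by decide,
      pvCase tl _ _ _ _ h8 (pvDischarge tl _ hF8 _ _ (by decide)) (pvDischarge tl _ hF8 _ _ (by decide))]
    simp at h8
    simp [pvScanA, h0c, h1c, h2c, h3c, h4c, h5c, h6c, h7c, h8]
  have h8f : PySem.Str.isIn "mid-level" tl = false := by simpa using h8
  have h8c := h8f
  simp at h8c
  have hF9 := pvConsF h8f hF8
  by_cases h9 : PySem.Str.isIn "mid level" tl = true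
  · rw [show pvKW = pvKW.take 11 ++ ("mid level", (2 : Int)) :: pvKW.drop 12 from by decide,
      pvCase tl _ _ _ _ h9 (pvDischarge tl _ hF9 _ _ (by decide)) (pvDischarge tl _ hF9 _ _ (by decide))]
    simp at h9
    simp [pvScanA, h0c, h1c, h2c, h3c, h4c, h5c, h6c, h7c, h8c, h9]
  have h9f : PySem.Str.isIn "mid level" tl = false := by simpa using h9
  have h9c := h9f
  simp at h9c
  have hF10 := pvConsF h9f hF9
  by_cases h10 : PySem.Str.isIn "tech lead" tl = true
  · rw [show pvKW = pvKW.take 15 ++ ("tech lead", (4 : Int)) :: pvKW.drop 16 from by decide,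
      pvCase tl _ _ _ _ h10 (pvDischarge tl _ hF10 _ _ (by decide)) (pvDischarge tl _ hF10 _ _ (by decide))]
    simp at h10
    simp [pvScanA, h0c, h1c, h2c, h3c, h4c, h5c, h6c, h7c, h8c, h9c, h10]
  have h10f : PySem.Str.isIn "tech lead" tl = false := by simpa using h10
  have h10c := h10f
  simp at h10c
  have hF11 := pvConsF h10f hF10
  by_cases h11 : PySem.Str.isIn "team lead" tl = true
  · rw [show pvKW = pvKW.take 16 ++ ("team lead", (4 : Int)) :: pvKW.drop 17 from by decide,
      pvCase tl _ _ _ _ h11 (pvDischarge tl _ hF11 _ _ (by decide)) (pvDischarge tl _ hF11 _ _ (by decide))]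
    simp at h11
    simp [pvScanA, h0c, h1c, h2c, h3c, h4c, h5c, h6c, h7c, h8c, h9c, h10c, h11]
  have h11f : PySem.Str.isIn "team lead" tl = false := by simpa using h11
  have h11c := h11f
  simp at h11c
  have hF12 := pvConsF h11f hF11
  by_cases h12 : PySem.Str.isIn "principal" tl = true
  · rw [show pvKW = pvKW.take 17 ++ ("principal", (5 : Int)) :: pvKW.drop 18 from by decide,
      pvCase tl _ _ _ _ h12 (pvDischarge tl _ hF12 _ _ (by decide)) (pvDischarge tl _ hF12 _ _ (by decide))]
    simp at h12
    simp [pvScanA, h0c, h1c, h2c, h3c, h4c, h5c, h6c, h7c, h8c, h9c, h10c, h11c, h12]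
  have h12f : PySem.Str.isIn "principal" tl = false := by simpa using h12
  have h12c := h12f
  simp at h12c
  have hF13 := pvConsF h12f hF12
  by_cases h13 : PySem.Str.isIn "architect" tl = true
  · rw [show pvKW = pvKW.take 20 ++ ("architect", (4 : Int)) :: pvKW.drop 21 from by decide,
      pvCase tl _ _ _ _ h13 (pvDischarge tl _ hF13 _ _ (by decide)) (pvDischarge tl _ hF13 _ _ (by decide))]
    simp at h13
    simp [pvScanA, h0c, h1c, h2c, h3c, h4c, h5c, h6c, h7c, h8c, h9c, h10c, h11c, h12c, h13]
  have h13f : PySem.Str.isIn "architect" tl = false := by simpa using h13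
  have h13c := h13f
  simp at h13c
  have hF14 := pvConsF h13f hF13
  by_cases h14 : PySem.Str.isIn "director" tl = true
  · rw [show pvKW = pvKW.take 23 ++ ("director", (5 : Int)) :: pvKW.drop 24 from by decide,
      pvCase tl _ _ _ _ h14 (pvDischarge tl _ hF14 _ _ (by decide)) (pvDischarge tl _ hF14 _ _ (by decide))]
    simp at h14
    simp [pvScanA, h0c, h1c, h2c, h3c, h4c, h5c, h6c, h7c, h8c, h9c, h10c, h11c, h12c, h13c, h14]
  have h14f : PySem.Str.isIn "director" tl = false := by simpa using h14
  have h14c := h14f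
  simp at h14c
  have hF15 := pvConsF h14f hF14
  by_cases h15 : PySem.Str.isIn "trainee" tl = true
  · rw [show pvKW = pvKW.take 1 ++ ("trainee", (0 : Int)) :: pvKW.drop 2 from by decide,
      pvCase tl _ _ _ _ h15 (pvDischarge tl _ hF15 _ _ (by decide)) (pvDischarge tl _ hF15 _ _ (by decide))]
    simp at h15
    simp [pvScanA, h0c, h1c, h2c, h3c, h4c, h5c, h6c, h7c, h8c, h9c, h10c, h11c, h12c, h13c, h14c, h15]
  have h15f : PySem.Str.isIn "trainee" tl = false := by simpa using h15
  have h15c := h15f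
  simp at h15c
  have hF16 := pvConsF h15f hF15
  by_cases h16 : PySem.Str.isIn "fresher" tl = true
  · rw [show pvKW = pvKW.take 3 ++ ("fresher", (0 : Int)) :: pvKW.drop 4 from by decide,
      pvCase tl _ _ _ _ h16 (pvDischarge tl _ hF16 _ _ (by decide)) (pvDischarge tl _ hF16 _ _ (by decide))]
    simp at h16
    simp [pvScanA, h0c, h1c, h2c, h3c, h4c, h5c, h6c, h7c, h8c, h9c, h10c, h11c, h12c, h13c, h14c, h15c, h16]
  have h16f : PySem.Str.isIn "fresher" tl = false := by simpa using h16
  have h16c := h16f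
  simp at h16c
  have hF17 := pvConsF h16f hF16
  by_cases h17 : PySem.Str.isIn "manager" tl = true
  · rw [show pvKW = pvKW.take 21 ++ ("manager", (4 : Int)) :: pvKW.drop 22 from by decide,
      pvCase tl _ _ _ _ h17 (pvDischarge tl _ hF17 _ _ (by decide)) (pvDischarge tl _ hF17 _ _ (by decide))]
    simp at h17
    simp [pvScanA, h0c, h1c, h2c, h3c, h4c, h5c, h6c, h7c, h8c, h9c, h10c, h11c, h12c, h13c, h14c, h15c, h16c, h17]
  have h17f : PySem.Str.isIn "manager" tl = false := by simpa using h17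
  have h17c := h17f
  simp at h17c
  have hF18 := pvConsF h17f hF17
  by_cases h18 : PySem.Str.isIn "head of" tl = true
  · rw [show pvKW = pvKW.take 24 ++ ("head of", (5 : Int)) :: pvKW.drop 25 from by decide,
      pvCase tl _ _ _ _ h18 (pvDischarge tl _ hF18 _ _ (by decide)) (pvDischarge tl _ hF18 _ _ (by decide))]
    simp at h18
    simp [pvScanA, h0c, h1c, h2c, h3c, h4c, h5c, h6c, h7c, h8c, h9c, h10c, h11c, h12c, h13c, h14c, h15c, h16c, h17c, h18]
  have h18f : PySem.Str.isIn "head of" tl = false := by simpa using h18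
  have h18c := h18f
  simp at h18c
  have hF19 := pvConsF h18f hF18
  by_cases h19 : PySem.Str.isIn "founder" tl = true
  · rw [show pvKW = pvKW.take 31 ++ ("founder", (7 : Int)) :: pvKW.drop 32 from by decide,
      pvCase tl _ _ _ _ h19 (pvDischarge tl _ hF19 _ _ (by decide)) (pvDischarge tl _ hF19 _ _ (by decide))]
    simp at h19
    simp [pvScanA, h0c, h1c, h2c, h3c, h4c, h5c, h6c, h7c, h8c, h9c, h10c, h11c, h12c, h13c, h14c, h15c, h16c, h17c, h18c, h19]
  have h19f : PySem.Str.isIn "founder" tl = false := by simpa using h19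
  have h19c := h19f
  simp at h19c
  have hF20 := pvConsF h19f hF19
  by_cases h20 : PySem.Str.isIn "intern" tl = true
  · rw [show pvKW = pvKW.take 0 ++ ("intern", (0 : Int)) :: pvKW.drop 1 from by decide,
      pvCase tl _ _ _ _ h20 (pvDischarge tl _ hF20 _ _ (by decide)) (pvDischarge tl _ hF20 _ _ (by decide))]
    simp at h20
    simp [pvScanA, h0c, h1c, h2c, h3c, h4c, h5c, h6c, h7c, h8c, h9c, h10c, h11c, h12c, h13c, h14c, h15c, h16c, h17c, h18c, h19c, h20]
  have h20f : PySem.Str.isIn "intern" tl = false := by simpa using h20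
  have h20c := h20f
  simp at h20c
  have hF21 := pvConsF h20f hF20
  by_cases h21 : PySem.Str.isIn "junior" tl = true
  · rw [show pvKW = pvKW.take 4 ++ ("junior", (1 : Int)) :: pvKW.drop 5 from by decide,
      pvCase tl _ _ _ _ h21 (pvDischarge tl _ hF21 _ _ (by decide)) (pvDischarge tl _ hF21 _ _ (by decide))]
    simp at h21
    simp [pvScanA, h0c, h1c, h2c, h3c, h4c, h5c, h6c, h7c, h8c, h9c, h10c, h11c, h12c, h13c, h14c, h15c, h16c, h17c, h18c, h19c, h20c, h21]
  have h21f : PySem.Str.isIn "junior" tl = false := by simpa using h21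
  have h21c := h21f
  simp at h21c
  have hF22 := pvConsF h21f hF21
  by_cases h22 : PySem.Str.isIn "senior" tl = true
  · rw [show pvKW = pvKW.take 12 ++ ("senior", (3 : Int)) :: pvKW.drop 13 from by decide,
      pvCase tl _ _ _ _ h22 (pvDischarge tl _ hF22 _ _ (by decide)) (pvDischarge tl _ hF22 _ _ (by decide))]
    simp at h22
    simp [pvScanA, h0c, h1c, h2c, h3c, h4c, h5c, h6c, h7c, h8c, h9c, h10c, h11c, h12c, h13c, h14c, h15c, h16c, h17c, h18c, h19c, h20c, h21c, h22]
  have h22f : PySem.Str.isIn "senior" tl = false := by simpa using h22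
  have h22c := h22f
  simp at h22c
  have hF23 := pvConsF h22f hF22
  by_cases h23 : PySem.Str.isIn "staff" tl = true
  · rw [show pvKW = pvKW.take 18 ++ ("staff", (5 : Int)) :: pvKW.drop 19 from by decide,
      pvCase tl _ _ _ _ h23 (pvDischarge tl _ hF23 _ _ (by decide)) (pvDischarge tl _ hF23 _ _ (by decide))]
    simp at h23
    simp [pvScanA, h0c, h1c, h2c, h3c, h4c, h5c, h6c, h7c, h8c, h9c, h10c, h11c, h12c, h13c, h14c, h15c, h16c, h17c, h18c, h19c, h20c, h21c, h22c, h23]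
  have h23f : PySem.Str.isIn "staff" tl = false := by simpa using h23
  have h23c := h23f
  simp at h23c
  have hF24 := pvConsF h23f hF23
  by_cases h24 : PySem.Str.isIn "lead" tl = true
  · rw [show pvKW = pvKW.take 14 ++ ("lead", (4 : Int)) :: pvKW.drop 15 from by decide,
      pvCase tl _ _ _ _ h24 (pvDischarge tl _ hF24 _ _ (by decide)) (pvDischarge tl _ hF24 _ _ (by decide))]
    simp at h24
    simp [pvScanA, h0c, h1c, h2c, h3c, h4c, h5c, h6c, h7c, h8c, h9c, h10c, h11c, h12c, h13c, h14c, h15c, h16c, h17c, h18c, h19c, h20c, h21c, h22c, h23c, h24]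
  have h24f : PySem.Str.isIn "lead" tl = false := by simpa using h24
  have h24c := h24f
  simp at h24c
  have hF25 := pvConsF h24f hF24
  by_cases h25 : PySem.Str.isIn "head" tl = true
  · rw [show pvKW = pvKW.take 25 ++ ("head", (5 : Int)) :: pvKW.drop 26 from by decide,
      pvCase tl _ _ _ _ h25 (pvDischarge tl _ hF25 _ _ (by decide)) (pvDischarge tl _ hF25 _ _ (by decide))]
    simp at h25
    simp [pvScanA, h0c, h1c, h2c, h3c, h4c, h5c, h6c, h7c, h8c, h9c, h10c, h11c, h12c, h13c, h14c, h15c, h16c, h17c, h18c, h19c, h20c, h21c, h22c, h23c, h24c, h25]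
  have h25f : PySem.Str.isIn "head" tl = false := by simpa using h25
  have h25c := h25f
  simp at h25c
  have hF26 := pvConsF h25f hF25
  by_cases h26 : PySem.Str.isIn "mid" tl = true
  · rw [show pvKW = pvKW.take 9 ++ ("mid", (2 : Int)) :: pvKW.drop 10 from by decide,
      pvCase tl _ _ _ _ h26 (pvDischarge tl _ hF26 _ _ (by decide)) (pvDischarge tl _ hF26 _ _ (by decide))]
    simp at h26
    simp [pvScanA, h0c, h1c, h2c, h3c, h4c, h5c, h6c, h7c, h8c, h9c, h10c, h11c, h12c, h13c, h14c, h15c, h16c, h17c, h18c, h19c, h20c, h21c, h22c, h23c, h24c, h25c, h26]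
  have h26f : PySem.Str.isIn "mid" tl = false := by simpa using h26
  have h26c := h26f
  simp at h26c
  have hF27 := pvConsF h26f hF26
  by_cases h27 : PySem.Str.isIn "cto" tl = true
  · rw [show pvKW = pvKW.take 28 ++ ("cto", (7 : Int)) :: pvKW.drop 29 from by decide,
      pvCase tl _ _ _ _ h27 (pvDischarge tl _ hF27 _ _ (by decide)) (pvDischarge tl _ hF27 _ _ (by decide))]
    simp at h27
    simp [pvScanA, h0c, h1c, h2c, h3c, h4c, h5c, h6c, h7c, h8c, h9c, h10c, h11c, h12c, h13c, h14c, h15c, h16c, h17c, h18c, h19c, h20c, h21c, h22c, h23c, h24c, h25c, h26c, h27]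
  have h27f : PySem.Str.isIn "cto" tl = false := by simpa using h27
  have h27c := h27f
  simp at h27c
  have hF28 := pvConsF h27f hF27
  by_cases h28 : PySem.Str.isIn "ceo" tl = true
  · rw [show pvKW = pvKW.take 29 ++ ("ceo", (7 : Int)) :: pvKW.drop 30 from by decide,
      pvCase tl _ _ _ _ h28 (pvDischarge tl _ hF28 _ _ (by decide)) (pvDischarge tl _ hF28 _ _ (by decide))]
    simp at h28
    simp [pvScanA, h0c, h1c, h2c, h3c, h4c, h5c, h6c, h7c, h8c, h9c, h10c, h11c, h12c, h13c, h14c, h15c, h16c, h17c, h18c, h19c, h20c, h21c, h22c, h23c, h24c, h25c, h26c, h27c, h28]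
  have h28f : PySem.Str.isIn "ceo" tl = false := by simpa using h28
  have h28c := h28f
  simp at h28c
  have hF29 := pvConsF h28f hF28
  by_cases h29 : PySem.Str.isIn "jr" tl = true
  · rw [show pvKW = pvKW.take 5 ++ ("jr", (1 : Int)) :: pvKW.drop 6 from by decide,
      pvCase tl _ _ _ _ h29 (pvDischarge tl _ hF29 _ _ (by decide)) (pvDischarge tl _ hF29 _ _ (by decide))]
    simp at h29
    simp [pvScanA, h0c, h1c, h2c, h3c, h4c, h5c, h6c, h7c, h8c, h9c, h10c, h11c, h12c, h13c, h14c, h15c, h16c, h17c, h18c, h19c, h20c, h21c, h22c, h23c, h24c, h25c, h26c, h27c, h28c, h29]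
  have h29f : PySem.Str.isIn "jr" tl = false := by simpa using h29
  have h29c := h29f
  simp at h29c
  have hF30 := pvConsF h29f hF29
  by_cases h30 : PySem.Str.isIn "sr" tl = true
  · rw [show pvKW = pvKW.take 13 ++ ("sr", (3 : Int)) :: pvKW.drop 14 from by decide,
      pvCase tl _ _ _ _ h30 (pvDischarge tl _ hF30 _ _ (by decide)) (pvDischarge tl _ hF30 _ _ (by decide))]
    simp at h30
    simp [pvScanA, h0c, h1c, h2c, h3c, h4c, h5c, h6c, h7c, h8c, h9c, h10c, h11c, h12c, h13c, h14c, h15c, h16c, h17c, h18c, h19c, h20c, h21c, h22c, h23c, h24c, h25c, h26c, h27c, h28c, h29c, h30]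
  have h30f : PySem.Str.isIn "sr" tl = false := by simpa using h30
  have h30c := h30f
  simp at h30c
  have hF31 := pvConsF h30f hF30
  by_cases h31 : PySem.Str.isIn "vp" tl = true
  · rw [show pvKW = pvKW.take 26 ++ ("vp", (6 : Int)) :: pvKW.drop 27 from by decide,
      pvCase tl _ _ _ _ h31 (pvDischarge tl _ hF31 _ _ (by decide)) (pvDischarge tl _ hF31 _ _ (by decide))]
    simp at h31
    simp [pvScanA, h0c, h1c, h2c, h3c, h4c, h5c, h6c, h7c, h8c, h9c, h10c, h11c, h12c, h13c, h14c, h15c, h16c, h17c, h18c, h19c, h20c, h21c, h22c, h23c, h24c, h25c, h26c, h27c, h28c, h29c, h30c, h31]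
  have h31f : PySem.Str.isIn "vp" tl = false := by simpa using h31
  have h31c := h31f
  simp at h31c
  have hF32 := pvConsF h31f hF31
  have hall : ∀ p ∈ pvKW, PySem.Str.isIn p.1 tl = false := by
    intro p hp
    exact hF32 p.1 ((by decide : ∀ q ∈ pvKW, q.1 ∈ ["vp","sr","jr","ceo","cto","mid","head","lead","staff","senior","junior","intern","founder","head of","manager","fresher","trainee","director","architect","principal","team lead","tech lead","mid level","mid-level","associate","co-founder","apprentice","entry-level","entry level","distinguished","vice president","engineering manager"]) p hp)
  rw [pvFoldFalse tl pvKW _ hall]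
  simp [pvScanA, h0c, h1c, h2c, h3c, h4c, h5c, h6c, h7c, h8c, h9c, h10c, h11c, h12c, h13c, h14c, h15c, h16c, h17c, h18c, h19c, h20c, h21c, h22c, h23c, h24c, h25c, h26c, h27c, h28c, h29c, h30c, h31c]

-- ===== VERDICT (by name: the statement is the Claim_ definition above) =====
theorem detect_seniority_spec : Claim_equal_detect_seniority := by
  intro t _
  unfold Spec_detect_seniority
  match t with
  | none => rfl
  | some s =>
    by_cases hs : s = ""
    · simp [detect_seniority, detect_seniority_alt, hs]
    · simp only [detect_seniority, detect_seniority_alt, if_neg hs]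
      exact pvKey _
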